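-- pv_equiv track=rewrite | github.com/jpaullopes/questoes-bee | python/n3_1263.py | aliteration
-- ===== SOURCE A (Python) =====
-- def aliteration(text):
--
--     text_list = text.split()
--     count = 0
--     is_sequence = False
--
--     for i in range(len(text_list) - 1):
--
--         if text_list[i][0] == text_list[i + 1][0]:
--             if not is_sequence:
--                 count += 1
--                 is_sequence = True
--
--         else:
--             is_sequence = False
--
--     return count
-- ===== SOURCE B (Python) =====
-- from itertools import groupby
--
-- def aliteration(text):
--     # Group consecutive words by their first letter; each maximal run of
--     # length >= 2 is exactly one alliteration.
--     return sum(1 for _, g in groupby(text.split(), key=lambda w: w[0])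
--                if len(list(g)) >= 2)
-- ===== Notes on version B (the rewrite author's own statement) =====
-- stated objective: idiomatic
-- what changed: Replaces A's is_sequence flag state machine over adjacent index pairs by itertools.groupby grouping consecutive words by first letter and counting groups of length >= 2.
import Mathlib
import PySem

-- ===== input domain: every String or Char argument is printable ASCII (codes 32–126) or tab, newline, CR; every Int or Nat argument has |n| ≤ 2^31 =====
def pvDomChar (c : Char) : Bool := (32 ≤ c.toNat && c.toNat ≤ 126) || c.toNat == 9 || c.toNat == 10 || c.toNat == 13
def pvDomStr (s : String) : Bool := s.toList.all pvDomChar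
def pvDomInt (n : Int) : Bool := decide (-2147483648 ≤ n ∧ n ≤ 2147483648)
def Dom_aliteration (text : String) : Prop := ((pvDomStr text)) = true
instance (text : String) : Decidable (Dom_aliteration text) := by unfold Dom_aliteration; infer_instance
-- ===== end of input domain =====

-- B replaces A's is_sequence flag state machine over adjacent index pairs by grouping
-- consecutive words by first letter (itertools.groupby / List.splitBy) and counting
-- groups of length >= 2; objective: idiomatic.

-- ===== PORT A =====
def aliteration (text : String) : Int :=
  let text_list := PySem.Str.split₀ text
  let st := (PySem.List.pyRange 0 ((text_list.length : Int) - 1) 1).foldl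
    (fun (st : Int × Bool) i =>
      if PySem.Str.pyGet? (PySem.List.pyGetD text_list i "") 0 ==
         PySem.Str.pyGet? (PySem.List.pyGetD text_list (i + 1) "") 0 then
        if !st.2 then (st.1 + 1, true) else st
      else (st.1, false))
    (0, false)
  st.1

-- ===== PORT B =====
-- B: group consecutive words by first letter (itertools.groupby ~ List.splitBy),
-- count groups of length >= 2.
def aliteration_alt (text : String) : Int :=
  let groups := (PySem.Str.split₀ text).splitBy
    (fun a b => PySem.Str.pyGet? a 0 == PySem.Str.pyGet? b 0)
  ((groups.filter (fun g => decide (2 ≤ g.length))).length : Int)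

-- ===== PRECONDITION & SPEC =====
def Spec_aliteration (text : String) (out : Int) : Prop := out = aliteration_alt text
instance (text : String) (out : Int) : Decidable (Spec_aliteration text out) := by unfold Spec_aliteration; infer_instance

-- ===== CLAIM (what is proved, stated in full; the proofs are below) =====
def Claim_equal_aliteration : Prop := ∀ (text : String), Dom_aliteration text → Spec_aliteration text (aliteration text)

-- ===== LEMMAS AND PROOFS =====

-- the first letter of a word, as both programs compute it
def pvKey (w : String) : Option Char := PySem.Str.pyGet? w 0

-- the value A's flag state machine adds while scanning ys after current word x with flag
def pvFA : String → List String → Bool → Int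
  | _, [], _ => 0
  | x, y :: ys, flag =>
    if pvKey x == pvKey y then (if flag then pvFA y ys true else 1 + pvFA y ys true)
    else pvFA y ys false

-- B's count over a list of groups
def pvC (gs : List (List String)) : Int :=
  ((gs.filter (fun g => decide (2 ≤ g.length))).length : Int)

theorem pvC_reverse (gs : List (List String)) : pvC gs.reverse = pvC gs := by
  simp [pvC, List.filter_reverse]

theorem pvC_cons (g : List String) (gs : List (List String)) :
    pvC (g :: gs) = (if 2 ≤ g.length then 1 else 0) + pvC gs := by
  rcases h : decide (2 ≤ g.length) with _ | _
  · simp only [pvC, List.filter_cons, h, Bool.false_eq_true, if_false]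
    rw [if_neg (by simpa using h)]
    ring
  · simp only [pvC, List.filter_cons, h, if_true]
    rw [if_pos (by simpa using h)]
    simp only [List.length_cons]
    push_cast
    ring

-- invariant of splitBy.loop against A's state machine
theorem pvLoop (ys : List String) : ∀ (y : String) (g : List String) (acc : List (List String)),
    pvC (List.splitBy.loop (fun a b => pvKey a == pvKey b) ys y g acc)
      = pvC acc + (if g = [] then 0 else 1) + pvFA y ys (!g.isEmpty) := by
  induction ys with
  | nil =>
    intro y g acc
    simp only [List.splitBy.loop, pvFA, pvC_reverse, pvC_cons]
    rcases g with _ | ⟨z, zs⟩ <;> simp <;> try ring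
  | cons z zs ih =>
    intro y g acc
    simp only [List.splitBy.loop]
    rcases hk : pvKey y == pvKey z with _ | _
    · simp only [ih, pvFA, hk]
      rcases g with _ | ⟨w, ws⟩ <;> simp [pvC_cons] <;> try ring
    · simp only [ih, pvC_cons, pvFA, hk]
      rcases g with _ | ⟨w, ws⟩ <;> simp <;> try ring

-- the word at position pre.length of pre ++ w :: rest
theorem pvGetAt (pre rest : List String) (w : String) :
    PySem.List.pyGetD (pre ++ w :: rest) ((pre.length : Int)) "" = w := by
  rw [PySem.List.pyGetD_eq_getElem _ _ (by positivity)
      (by push_cast [List.length_append, List.length_cons]; omega)]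
  simp

-- A's indexed fold over range(len-1), generalized over an already-processed prefix
theorem pvARange (xs : List String) : ∀ (pre : List String) (x : String) (st : Int × Bool),
    ((PySem.List.pyRange (pre.length : Int) ((pre.length : Int) + (xs.length : Int)) 1).foldl
      (fun (st : Int × Bool) i =>
        if PySem.Str.pyGet? (PySem.List.pyGetD (pre ++ x :: xs) i "") 0 ==
           PySem.Str.pyGet? (PySem.List.pyGetD (pre ++ x :: xs) (i + 1) "") 0 then
          if !st.2 then (st.1 + 1, true) else st
        else (st.1, false)) st).1
      = st.1 + pvFA x xs st.2 := by
  induction xs with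
  | nil =>
    intro pre x st
    simp [pvFA, PySem.List.pyRange_one_eq_nil]
  | cons y ys ih =>
    intro pre x st
    have hlt : (pre.length : Int) < (pre.length : Int) + (((y :: ys).length : Nat) : Int) := by
      push_cast [List.length_cons]; omega
    rw [PySem.List.pyRange_one_cons hlt, List.foldl_cons]
    have hget1 := pvGetAt pre (y :: ys) x
    have hget2 : PySem.List.pyGetD (pre ++ x :: y :: ys) ((pre.length : Int) + 1) "" = y := by
      have h := pvGetAt (pre ++ [x]) ys y
      simpa using h
    have hihe := ih (pre ++ [x]) y
    have hassoc : (pre ++ [x]) ++ y :: ys = pre ++ x :: y :: ys := by simp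
    have hlen : (((pre ++ [x]).length : Nat) : Int) = (pre.length : Int) + 1 := by
      push_cast [List.length_append, List.length_cons, List.length_nil]; ring
    rw [hassoc, hlen] at hihe
    have hib : (pre.length : Int) + (((y :: ys).length : Nat) : Int)
        = ((pre.length : Int) + 1) + ((ys.length : Nat) : Int) := by
      push_cast [List.length_cons]; ring
    rw [hib]
    rcases hk : (PySem.Str.pyGet? x 0 == PySem.Str.pyGet? y 0) with _ | _
    · simp only [hget1, hget2, hk, Bool.false_eq_true, if_false]
      rw [hihe (st.1, false)]
      have hk' : (pvKey x == pvKey y) = false := by simpa [pvKey] using hk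
      simp [pvFA, hk']
    · rcases hst : st.2 with _ | _
      · simp only [hget1, hget2, hk, hst, Bool.not_false, if_true]
        rw [hihe (st.1 + 1, true)]
        have hk' : (pvKey x == pvKey y) = true := by simpa [pvKey] using hk
        simp [pvFA, hk']
        ring
      · simp only [hget1, hget2, hk, hst, Bool.not_true, if_true, Bool.false_eq_true, if_false]
        rw [hihe st]
        have hk' : (pvKey x == pvKey y) = true := by simpa [pvKey] using hk
        simp [pvFA, hk', hst]

-- ===== VERDICT (by name: the statement is the Claim_ definition above) =====
theorem aliteration_spec : Claim_equal_aliteration := by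
  intro text _
  unfold Spec_aliteration aliteration aliteration_alt
  rcases hws : PySem.Str.split₀ text with _ | ⟨x, xs⟩
  · simp [PySem.List.pyRange_one_eq_nil, List.splitBy]
  · simp only [List.length_cons, Nat.cast_add, Nat.cast_one]
    have hb : ((xs.length : Int) + 1) - 1 = (0 : Int) + (xs.length : Int) := by ring
    rw [hb]
    have hA := pvARange xs [] x ((0 : Int), false)
    simp only [List.length_nil, Nat.cast_zero, List.nil_append] at hA
    refine Eq.trans hA ?_
    have hB : pvC (List.splitBy (fun a b => pvKey a == pvKey b) (x :: xs))
        = pvFA x xs false := by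
      simp only [List.splitBy, pvLoop]
      simp [pvC]
    simp only [pvKey] at hB
    have h2 : ((List.filter (fun g => decide (2 ≤ g.length))
        (List.splitBy (fun a b => PySem.Str.pyGet? a 0 == PySem.Str.pyGet? b 0) (x :: xs))).length : Int)
        = pvFA x xs false := hB
    rw [h2]
    ring
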